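-- pv_equiv track=rewrite | github.com/samarthrao34/disha | DISHAMemory.py | check_creator_question
-- ===== SOURCE A (Python) =====
-- def check_creator_question(transcript):
--     """Detect if user is asking about DISHA's creator"""
--     creator_patterns = [
--         "who created you",
--         "who made you",
--         "who built you",
--         "who developed you",
--         "who designed you",
--         "who is your creator",
--         "who is your maker",
--         "who is your developer",
--         "created by",
--         "made by",
--         "your creator",
--         "your maker",
--         "your developer",
--     ]
--
--     transcript_lower = transcript.lower()
--     for pattern in creator_patterns:
--         if pattern in transcript_lower:
--             return True
--     return False
-- ===== SOURCE B (Python) =====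
-- _PATTERNS = (
--     "who created you;who made you;who built you;who developed you;"
--     "who designed you;who is your creator;who is your maker;"
--     "who is your developer;created by;made by;your creator;your maker;"
--     "your developer"
-- ).split(";")
--
--
-- def check_creator_question(transcript):
--     """Detect if user is asking about DISHA's creator"""
--     # Online multi-pattern scanner: one pass over the lowered transcript,
--     # maintaining the set of partial matches (pattern suffixes still pending).
--     active = []
--     for ch in transcript.lower():
--         nxt = []
--         for rest in active + _PATTERNS:
--             if rest[0] == ch:
--                 if len(rest) == 1:
--                     return True
--                 nxt.append(rest[1:])
--         active = nxt
--     return False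
-- ===== Notes on version B (the rewrite author's own statement) =====
-- stated objective: alternative
-- what changed: A scans the transcript once per pattern with k separate substring tests; B is an online multi-pattern scanner that makes ONE pass over the lowered transcript's characters, maintaining the set of partial matches (pending pattern suffixes) and succeeding the moment any pattern completes.
import Mathlib
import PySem

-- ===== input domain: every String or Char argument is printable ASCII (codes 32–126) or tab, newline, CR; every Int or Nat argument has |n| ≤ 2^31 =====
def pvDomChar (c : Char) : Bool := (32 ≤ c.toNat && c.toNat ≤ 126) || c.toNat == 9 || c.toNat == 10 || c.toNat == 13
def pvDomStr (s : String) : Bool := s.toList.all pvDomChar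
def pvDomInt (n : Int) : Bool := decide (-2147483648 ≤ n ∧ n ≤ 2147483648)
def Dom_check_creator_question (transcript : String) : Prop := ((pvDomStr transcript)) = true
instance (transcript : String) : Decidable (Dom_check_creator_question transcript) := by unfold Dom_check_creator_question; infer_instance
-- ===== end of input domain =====

-- B replaces A's k separate substring scans by an online multi-pattern scanner:
-- one pass over the lowered transcript maintaining the pending partial matches
-- (objective: alternative; same result).

-- ===== PORT A =====
def creator_patterns : List String := [
  "who created you",
  "who made you",
  "who built you",
  "who developed you",
  "who designed you",
  "who is your creator",
  "who is your maker",
  "who is your developer",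
  "created by",
  "made by",
  "your creator",
  "your maker",
  "your developer"]

-- the for-loop with early 'return True', as structural recursion over the pattern list
def creatorLoopA (transcript_lower : String) : List String → Bool
  | [] => false
  | p :: rest =>
      if PySem.Str.isIn p transcript_lower then true else creatorLoopA transcript_lower rest

def check_creator_question (transcript : String) : Bool :=
  let transcript_lower := PySem.Str.lower transcript
  creatorLoopA transcript_lower creator_patterns

-- ===== PORT B =====
-- B's module-level pattern list, built as in Source B by splitting one literal on ';';
-- Python strings are modelled as their char lists (PySem primitives live on List Char).
def creatorPatternsB : List (List Char) :=
  (PySem.Chars.splitOn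
    ("who created you;who made you;who built you;who developed you;" ++
     "who designed you;who is your creator;who is your maker;" ++
     "who is your developer;created by;made by;your creator;your maker;" ++
     "your developer").toList ";".toList)

-- the inner 'for rest in active + _PATTERNS' loop with its early 'return True':
-- none = a pattern completed (return True); some nxt = the new list of pending suffixes.
-- (the r = [] arm mirrors Python's rest[0] only formally: every candidate is nonempty)
def creatorStepB (c : Char) : List (List Char) → Option (List (List Char))
  | [] => some []
  | r :: rs =>
      match r with
      | [] => creatorStepB c rs
      | x :: xs =>
          if x == c then
            if xs.isEmpty then none
            else (creatorStepB c rs).map (fun l => xs :: l)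
          else creatorStepB c rs

-- the outer 'for ch in transcript.lower()' loop carrying 'active'
def creatorScanB (active : List (List Char)) : List Char → Bool
  | [] => false
  | c :: cs =>
      match creatorStepB c (active ++ creatorPatternsB) with
      | none => true
      | some nxt => creatorScanB nxt cs

def check_creator_question_alt (transcript : String) : Bool :=
  creatorScanB [] (PySem.Str.lower transcript).toList

-- ===== PRECONDITION & SPEC =====
def Spec_check_creator_question (transcript : String) (out : Bool) : Prop := out = check_creator_question_alt transcript
instance (transcript : String) (out : Bool) : Decidable (Spec_check_creator_question transcript out) := by unfold Spec_check_creator_question; infer_instance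

-- ===== CLAIM (what is proved, stated in full; the proofs are below) =====
def Claim_equal_check_creator_question : Prop := ∀ (transcript : String), Dom_check_creator_question transcript → Spec_check_creator_question transcript (check_creator_question transcript)

-- ===== LEMMAS AND PROOFS =====

-- A's early-return loop is the disjunction of the membership tests
theorem creatorLoopA_eq_any (t : String) (ps : List String) :
    creatorLoopA t ps = ps.any (fun p => PySem.Str.isIn p t) := by
  induction ps with
  | nil => rfl
  | cons p rest ih =>
      simp only [creatorLoopA, List.any_cons, ih]
      cases PySem.Str.isIn p t <;> simp

-- every B pattern is nonempty
set_option maxRecDepth 8192 in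
theorem creatorPatternsB_ne_nil : ∀ t ∈ creatorPatternsB, t ≠ [] := by decide

-- the inner loop finds a complete match iff the one-char suffix [c] is a candidate
theorem creatorStepB_eq_none_iff (c : Char) (cands : List (List Char)) :
    creatorStepB c cands = none ↔ [c] ∈ cands := by
  induction cands with
  | nil => simp [creatorStepB]
  | cons r rs ih =>
      rcases r with _ | ⟨x, xs⟩
      · simpa [creatorStepB] using ih
      · by_cases hx : x = c
        · subst hx
          rcases xs with _ | ⟨y, ys⟩
          · simp [creatorStepB]
          · simp only [creatorStepB, beq_self_eq_true, if_true, List.isEmpty_cons,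
              Bool.false_eq_true, if_false, Option.map_eq_none_iff, ih, List.mem_cons]
            constructor
            · exact Or.inr
            · rintro (h | h)
              · cases h
              · exact h
        · simp only [creatorStepB, beq_eq_false_iff_ne.2 hx, Bool.false_eq_true,
            if_false, ih, List.mem_cons]
          constructor
          · exact Or.inr
          · rintro (h | h)
            · cases h; exact absurd rfl hx
            · exact h

-- membership in the surviving list: exactly the advanced nonempty suffixes
theorem creatorStepB_mem (c : Char) (cands : List (List Char)) :
    ∀ l, creatorStepB c cands = some l → ∀ t, (t ∈ l ↔ (c :: t) ∈ cands ∧ t ≠ []) := by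
  induction cands with
  | nil =>
      intro l h t
      simp only [creatorStepB, Option.some.injEq] at h
      subst h; simp
  | cons r rs ih =>
      intro l h t
      rcases r with _ | ⟨x, xs⟩
      · simp only [creatorStepB] at h
        rw [ih l h t]
        simp
      · by_cases hx : c = x
        · subst hx
          simp only [creatorStepB, beq_self_eq_true, if_true] at h
          cases hxs : xs.isEmpty with
          | true => rw [hxs] at h; simp at h
          | false =>
              rw [hxs] at h
              simp only [Bool.false_eq_true, if_false] at h
              cases hrec : creatorStepB c rs with
              | none => rw [hrec] at h; simp at h
              | some l' =>
                  rw [hrec] at h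
                  simp only [Option.map_some, Option.some.injEq] at h
                  subst h
                  simp only [List.mem_cons, ih l' hrec t, List.cons.injEq]
                  constructor
                  · rintro (rfl | ⟨hm, hne⟩)
                    · refine ⟨Or.inl ⟨trivial, rfl⟩, ?_⟩
                      intro hnil; rw [hnil] at hxs; simp at hxs
                    · exact ⟨Or.inr hm, hne⟩
                  · rintro ⟨(⟨_, rfl⟩ | hm), hne⟩
                    · exact Or.inl rfl
                    · exact Or.inr ⟨hm, hne⟩
        · simp only [creatorStepB, beq_eq_false_iff_ne.2 (Ne.symm hx), Bool.false_eq_true,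
            if_false] at h
          rw [ih l h t]
          simp only [List.mem_cons, List.cons.injEq]
          constructor
          · rintro ⟨hm, hne⟩; exact ⟨Or.inr hm, hne⟩
          · rintro ⟨(⟨hcx, _⟩ | hm), hne⟩
            · exact absurd hcx.symm (Ne.symm hx)
            · exact ⟨hm, hne⟩

-- infix of a cons: matches at the head (prefix) or further right
theorem infix_cons_split (p : List Char) (c : Char) (cs : List Char) :
    p <:+: (c :: cs) ↔ p <+: (c :: cs) ∨ p <:+: cs := by
  constructor
  · rintro ⟨s, t, hst⟩
    cases s with
    | nil => exact Or.inl ⟨t, by simpa using hst⟩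
    | cons a as =>
        simp only [List.cons_append, List.cons.injEq] at hst
        exact Or.inr ⟨as, t, hst.2⟩
  · rintro (⟨t, ht⟩ | ⟨s, t, hst⟩)
    · exact ⟨[], t, by simpa using ht⟩
    · exact ⟨c :: s, t, by simp [← hst]⟩

-- a nonempty prefix of c :: cs is c :: (a prefix of cs)
theorem prefix_cons_elim {t : List Char} {c : Char} {cs : List Char}
    (hne : t ≠ []) (hpre : t <+: (c :: cs)) :
    ∃ xs, t = c :: xs ∧ xs <+: cs := by
  obtain ⟨x, xs, rfl⟩ := List.exists_cons_of_ne_nil hne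
  rcases hpre with ⟨u, hu⟩
  simp only [List.cons_append, List.cons.injEq] at hu
  exact ⟨xs, by rw [hu.1], ⟨u, hu.2⟩⟩

-- the scanner's invariant: it succeeds iff a pending suffix completes as a prefix
-- of the rest, or some pattern occurs anywhere in the rest
theorem creatorScanB_correct (s : List Char) :
    ∀ active, (∀ t ∈ active, t ≠ []) →
      (creatorScanB active s = true ↔
        (∃ t ∈ active, t <+: s) ∨ ∃ p ∈ creatorPatternsB, p <:+: s) := by
  induction s with
  | nil =>
      intro active hne
      simp only [creatorScanB, Bool.false_eq_true, false_iff]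
      rintro (⟨t, ht, hp⟩ | ⟨p, hp, hinf⟩)
      · exact hne t ht (List.prefix_nil.1 hp)
      · exact creatorPatternsB_ne_nil p hp (List.eq_nil_of_infix_nil hinf)
  | cons c cs ih =>
      intro active hne
      have hcandne : ∀ t ∈ active ++ creatorPatternsB, t ≠ [] := by
        intro t ht
        rcases List.mem_append.1 ht with h | h
        · exact hne t h
        · exact creatorPatternsB_ne_nil t h
      simp only [creatorScanB]
      cases hstep : creatorStepB c (active ++ creatorPatternsB) with
      | none =>
          simp only [true_iff]
          have hmem : [c] ∈ active ++ creatorPatternsB :=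
            (creatorStepB_eq_none_iff c _).1 hstep
          rcases List.mem_append.1 hmem with h | h
          · exact Or.inl ⟨[c], h, by simp⟩
          · exact Or.inr ⟨[c], h, ⟨[], cs, by simp⟩⟩
      | some nxt =>
          have hmem := creatorStepB_mem c (active ++ creatorPatternsB) nxt hstep
          have hnxtne : ∀ t ∈ nxt, t ≠ [] := fun t ht => ((hmem t).1 ht).2
          rw [ih nxt hnxtne]
          have hnone : [c] ∉ active ++ creatorPatternsB := by
            intro hm
            rw [(creatorStepB_eq_none_iff c _).2 hm] at hstep
            cases hstep
          constructor
          · rintro (⟨t, ht, hpre⟩ | ⟨p, hp, hinf⟩)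
            · have hm := (hmem t).1 ht
              rcases List.mem_append.1 hm.1 with hA | hP
              · exact Or.inl ⟨c :: t, hA, (List.prefix_cons_inj c).2 hpre⟩
              · exact Or.inr ⟨c :: t, hP, (infix_cons_split _ c cs).2
                  (Or.inl ((List.prefix_cons_inj c).2 hpre))⟩
            · exact Or.inr ⟨p, hp, (infix_cons_split _ c cs).2 (Or.inr hinf)⟩
          · rintro (⟨t, htA, hpre⟩ | ⟨p, hp, hinf⟩)
            · obtain ⟨xs, rfl, hxs⟩ := prefix_cons_elim (hne t htA) hpre
              have hxsne : xs ≠ [] := by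
                rintro rfl
                exact hnone (List.mem_append.2 (Or.inl htA))
              exact Or.inl ⟨xs, (hmem xs).2
                ⟨List.mem_append.2 (Or.inl htA), hxsne⟩, hxs⟩
            · rcases (infix_cons_split p c cs).1 hinf with hpre | hlater
              · obtain ⟨xs, rfl, hxs⟩ :=
                  prefix_cons_elim (creatorPatternsB_ne_nil p hp) hpre
                have hxsne : xs ≠ [] := by
                  rintro rfl
                  exact hnone (List.mem_append.2 (Or.inr hp))
                exact Or.inl ⟨xs, (hmem xs).2
                  ⟨List.mem_append.2 (Or.inr hp), hxsne⟩, hxs⟩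
              · exact Or.inr ⟨p, hp, hlater⟩

-- B's pattern list is A's, char-listed
set_option maxRecDepth 8192 in
theorem creatorPatternsB_eq : creatorPatternsB = creator_patterns.map String.toList := by
  decide

-- ===== VERDICT (by name: the statement is the Claim_ definition above) =====
theorem check_creator_question_spec : Claim_equal_check_creator_question := by
  intro t _
  unfold Spec_check_creator_question check_creator_question check_creator_question_alt
  show creatorLoopA (PySem.Str.lower t) creator_patterns = _
  rw [creatorLoopA_eq_any]
  apply Bool.eq_iff_iff.mpr
  rw [creatorScanB_correct (PySem.Str.lower t).toList [] (by simp)]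
  simp only [List.any_eq_true, PySem.Str.isIn_eq, PySem.Chars.isIn_iff_infix,
    creatorPatternsB_eq, List.mem_map, List.not_mem_nil, false_and, exists_false,
    false_or]
  constructor
  · rintro ⟨p, hp, hinf⟩
    exact ⟨p.toList, ⟨p, hp, rfl⟩, hinf⟩
  · rintro ⟨q, ⟨p, hp, rfl⟩, hinf⟩
    exact ⟨p, hp, hinf⟩
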